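-- pv_equiv track=rewrite | github.com/tanvir-robin/cp | Compiler_Mid/Recursive_Decent_Parser.py | parse_c
-- ===== SOURCE A (Python) =====
-- def parse_c(expr, pos=0):
--     if pos + 1 < len(expr) and expr[pos] == '0' and expr[pos + 1] == '1':
--         return True, pos + 2
--     elif pos < len(expr) and expr[pos] == '0':
--         ok1, next_pos1 = parse_c(expr, pos + 1)
--         if not ok1 or next_pos1 >= len(expr) or expr[next_pos1] != '1':
--             return False, pos
--         return True, next_pos1 + 1
--     else:
--         return False, pos
-- ===== SOURCE B (Python) =====
-- def parse_c(expr, pos=0):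
--     start = pos
--     n = 0
--     while pos < len(expr) and expr[pos] == '0':
--         n += 1
--         pos += 1
--     if n == 0:
--         return False, start
--     for _ in range(n):
--         if pos >= len(expr) or expr[pos] != '1':
--             return False, start
--         pos += 1
--     return True, pos
-- ===== Notes on version B (the rewrite author's own statement) =====
-- stated objective: alternative
-- what changed: Replaces the recursive descent (recurse past each '0', then check a '1' while unwinding) by an iterative two-loop scan: count n leading zeros, then check n following ones, returning the saved start position on failure.
import Mathlib
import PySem

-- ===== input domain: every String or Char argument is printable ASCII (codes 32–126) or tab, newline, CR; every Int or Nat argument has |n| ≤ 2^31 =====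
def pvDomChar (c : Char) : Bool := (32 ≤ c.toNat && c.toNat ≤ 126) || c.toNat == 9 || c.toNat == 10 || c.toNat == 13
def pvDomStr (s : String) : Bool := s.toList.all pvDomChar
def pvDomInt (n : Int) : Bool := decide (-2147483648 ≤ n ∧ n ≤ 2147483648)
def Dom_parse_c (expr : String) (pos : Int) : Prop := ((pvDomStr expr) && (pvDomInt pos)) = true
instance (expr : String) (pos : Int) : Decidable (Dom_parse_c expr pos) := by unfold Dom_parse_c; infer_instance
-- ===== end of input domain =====

-- B replaces A's recursion by an iterative pass: count the leading zeros, then check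
-- equally many ones (same return values, including the original pos on every failure).

-- ===== PORT A =====
-- the statements after A's recursive call (`ok1, next_pos1 = parse_c(...)`): r.1 = ok1, r.2 = next_pos1
def pvAfter (expr : String) (pos : Int) (r : Bool × Int) : Bool × Int :=
  if r.1 = false ∨ PySem.Str.len expr ≤ r.2 ∨ PySem.Str.pyGet? expr r.2 ≠ some '1' then
    (false, pos)
  else (true, r.2 + 1)

-- literal transliteration of A's recursion; expr[i] is PySem.Str.pyGet? (negative
-- indices wrap; none = IndexError, excluded by Pre_parse_c)
def parse_c (expr : String) (pos : Int) : Bool × Int :=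
  if pos + 1 < PySem.Str.len expr ∧ PySem.Str.pyGet? expr pos = some '0'
       ∧ PySem.Str.pyGet? expr (pos + 1) = some '1' then
    (true, pos + 2)
  else if h : pos < PySem.Str.len expr ∧ PySem.Str.pyGet? expr pos = some '0' then
    pvAfter expr pos (parse_c expr (pos + 1))
  else (false, pos)
termination_by (PySem.Str.len expr - pos).toNat
decreasing_by
  have := h.1
  simp [PySem.Str.len] at *
  omega

-- ===== PORT B =====
-- the `while pos < len(expr) and expr[pos] == '0'` loop: number of steps it takes
def pvZeros (expr : String) (pos : Int) : Nat :=
  if h : pos < PySem.Str.len expr ∧ PySem.Str.pyGet? expr pos = some '0' then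
    pvZeros expr (pos + 1) + 1
  else 0
termination_by (PySem.Str.len expr - pos).toNat
decreasing_by
  have := h.1
  simp [PySem.Str.len] at *
  omega

-- the `for _ in range(n)` loop: true iff no step hits `pos >= len(expr) or expr[pos] != '1'`
def pvOnes (expr : String) (pos : Int) : Nat → Bool
  | 0 => true
  | n + 1 =>
    if pos < PySem.Str.len expr ∧ PySem.Str.pyGet? expr pos = some '1' then
      pvOnes expr (pos + 1) n
    else false

-- the tail of B after the zero loop (n zeros consumed, so the current position is pos + n)
def pvFinish (expr : String) (pos : Int) (n : Nat) : Bool × Int :=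
  if n = 0 then (false, pos)
  else if pvOnes expr (pos + (n : Int)) n then (true, pos + 2 * (n : Int))
  else (false, pos)

def parse_c_alt (expr : String) (pos : Int) : Bool × Int :=
  pvFinish expr pos (pvZeros expr pos)

-- ===== PRECONDITION & SPEC =====
-- Pre_ excludes exactly pos < -len(expr), where Python A raises IndexError on expr[pos]
def Pre_parse_c (expr : String) (pos : Int) : Prop := -(PySem.Str.len expr) ≤ pos
instance (expr : String) (pos : Int) : Decidable (Pre_parse_c expr pos) := by unfold Pre_parse_c; infer_instance
def pvWitness_parse_c : String × Int := ("0011", 0)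
def Spec_parse_c (expr : String) (pos : Int) (out : Bool × Int) : Prop := out = parse_c_alt expr pos
instance (expr : String) (pos : Int) (out : Bool × Int) : Decidable (Spec_parse_c expr pos out) := by unfold Spec_parse_c; infer_instance

-- ===== CLAIM (what is proved, stated in full; the proofs are below) =====
def Claim_equal_parse_c : Prop := ∀ (expr : String) (pos : Int), Dom_parse_c expr pos → Pre_parse_c expr pos → Spec_parse_c expr pos (parse_c expr pos)

-- ===== LEMMAS AND PROOFS =====

theorem pvZeros_eq_zero (expr : String) (pos : Int)
    (h : ¬ (pos < PySem.Str.len expr ∧ PySem.Str.pyGet? expr pos = some '0')) :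
    pvZeros expr pos = 0 := by
  rw [pvZeros, dif_neg h]

theorem pvZeros_succ (expr : String) (pos : Int)
    (h : pos < PySem.Str.len expr ∧ PySem.Str.pyGet? expr pos = some '0') :
    pvZeros expr pos = pvZeros expr (pos + 1) + 1 := by
  rw [pvZeros, dif_pos h]

theorem pvOnes_unf (expr : String) (pos : Int) (n : Nat) :
    pvOnes expr pos (n + 1) =
      if pos < PySem.Str.len expr ∧ PySem.Str.pyGet? expr pos = some '1' then
        pvOnes expr (pos + 1) n
      else false := rfl

theorem pvOnes_zero (expr : String) (pos : Int) : pvOnes expr pos 0 = true := rfl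

-- peel the LAST step of the ones loop
theorem pvOnes_peel (expr : String) : ∀ (n : Nat) (pos : Int),
    pvOnes expr pos (n + 1) =
      (pvOnes expr pos n &&
        (if pos + (n : Int) < PySem.Str.len expr ∧
            PySem.Str.pyGet? expr (pos + (n : Int)) = some '1' then true else false)) := by
  intro n
  induction n with
  | zero =>
    intro pos
    have e : pos + ((0 : Nat) : Int) = pos := by push_cast; ring
    rw [e, pvOnes_unf, pvOnes_zero, pvOnes_zero, Bool.true_and]
  | succ k ih =>
    intro pos
    have e : pos + ((k + 1 : Nat) : Int) = pos + 1 + (k : Int) := by push_cast; ring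
    rw [pvOnes_unf expr pos (k + 1), ih (pos + 1), pvOnes_unf expr pos k, e]
    by_cases h : pos < PySem.Str.len expr ∧ PySem.Str.pyGet? expr pos = some '1'
    · rw [if_pos h, if_pos h]
    · rw [if_neg h, if_neg h, Bool.false_and]

theorem pvAfter_false (expr : String) (pos q : Int) :
    pvAfter expr pos (false, q) = (false, pos) := by
  rw [pvAfter, if_pos (Or.inl rfl)]

theorem pvAfter_true (expr : String) (pos q : Int) :
    pvAfter expr pos (true, q) =
      if PySem.Str.len expr ≤ q ∨ PySem.Str.pyGet? expr q ≠ some '1' then (false, pos)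
      else (true, q + 1) := by
  rw [pvAfter]
  by_cases hq : PySem.Str.len expr ≤ q ∨ PySem.Str.pyGet? expr q ≠ some '1'
  · rw [if_pos (Or.inr hq), if_pos hq]
  · rw [if_neg ?_, if_neg hq]
    rintro (h | h)
    · simp at h
    · exact hq h

theorem parse_c_agree (expr : String) : ∀ (m : Nat) (pos : Int),
    (PySem.Str.len expr - pos).toNat ≤ m → parse_c expr pos = parse_c_alt expr pos := by
  intro m
  induction m with
  | zero =>
    intro pos hm
    have c2 : ¬ (pos < PySem.Str.len expr ∧ PySem.Str.pyGet? expr pos = some '0') := by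
      intro ⟨h1, _⟩; omega
    have c1 : ¬ (pos + 1 < PySem.Str.len expr ∧ PySem.Str.pyGet? expr pos = some '0'
        ∧ PySem.Str.pyGet? expr (pos + 1) = some '1') := by
      intro ⟨h1, _⟩; omega
    rw [parse_c, if_neg c1, dif_neg c2, parse_c_alt, pvZeros_eq_zero expr pos c2,
        pvFinish, if_pos rfl]
  | succ k ih =>
    intro pos hm
    by_cases c2 : pos < PySem.Str.len expr ∧ PySem.Str.pyGet? expr pos = some '0'
    · -- current char is '0'
      by_cases c1 : pos + 1 < PySem.Str.len expr ∧ PySem.Str.pyGet? expr pos = some '0'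
          ∧ PySem.Str.pyGet? expr (pos + 1) = some '1'
      · -- A's first branch: one "01" pair
        have hz0 : pvZeros expr (pos + 1) = 0 := by
          apply pvZeros_eq_zero
          intro ⟨_, h0⟩
          rw [c1.2.2] at h0
          simp at h0
        have hn : pvZeros expr pos = 1 := by
          rw [pvZeros_succ expr pos c2, hz0]
        have e1 : pos + ((1 : Nat) : Int) = pos + 1 := by push_cast; ring
        have hone : pvOnes expr (pos + 1) 1 = true := by
          rw [pvOnes_unf, if_pos ⟨c1.1, c1.2.2⟩, pvOnes_zero]
        rw [parse_c, if_pos c1, parse_c_alt, hn, pvFinish, if_neg Nat.one_ne_zero,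
            e1, hone, if_pos rfl,
            show pos + 2 * ((1 : Nat) : Int) = pos + 2 from by push_cast; ring]
      · -- A's recursive branch
        have ihrec : parse_c expr (pos + 1) = parse_c_alt expr (pos + 1) := by
          apply ih
          have h1 := c2.1
          omega
        have hz : pvZeros expr pos = pvZeros expr (pos + 1) + 1 := pvZeros_succ expr pos c2
        rw [parse_c, if_neg c1, dif_pos c2, ihrec, parse_c_alt, parse_c_alt, hz]
        cases hzc : pvZeros expr (pos + 1) with
        | zero =>
          -- no zero and (by ¬c1) no one at pos+1: both fail at pos
          have hnot1 : ¬ (pos + 1 < PySem.Str.len expr ∧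
              PySem.Str.pyGet? expr (pos + 1) = some '1') := by
            intro ⟨ha, hb⟩; exact c1 ⟨ha, c2.2, hb⟩
          have e1 : pos + ((0 + 1 : Nat) : Int) = pos + 1 := by push_cast; ring
          rw [pvFinish, if_pos rfl, pvAfter_false, pvFinish, if_neg (Nat.succ_ne_zero 0),
              e1, pvOnes_unf, if_neg hnot1]
          rw [if_neg (by simp)]
        | succ w =>
          have e1 : pos + 1 + ((w + 1 : Nat) : Int) = pos + ((w + 1 + 1 : Nat) : Int) := by
            push_cast; ring
          have hpeel := pvOnes_peel expr (w + 1) (pos + ((w + 1 + 1 : Nat) : Int))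
          have eX : pos + ((w + 1 + 1 : Nat) : Int) + ((w + 1 : Nat) : Int)
              = pos + 1 + 2 * ((w + 1 : Nat) : Int) := by push_cast; ring
          rw [eX] at hpeel
          by_cases hok : pvOnes expr (pos + ((w + 1 + 1 : Nat) : Int)) (w + 1) = true
          · -- recursion succeeds, ending at pos + 1 + 2*(w+1)
            rw [pvFinish, if_neg (Nat.succ_ne_zero w), e1, hok, if_pos rfl, pvAfter_true,
                pvFinish, if_neg (Nat.succ_ne_zero (w + 1)), hpeel, hok, Bool.true_and]
            by_cases hlast : pos + 1 + 2 * ((w + 1 : Nat) : Int) < PySem.Str.len expr ∧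
                PySem.Str.pyGet? expr (pos + 1 + 2 * ((w + 1 : Nat) : Int)) = some '1'
            · rw [if_neg ?_, if_pos hlast, if_pos rfl,
                  show pos + 2 * ((w + 1 + 1 : Nat) : Int) = pos + 1 + 2 * ((w + 1 : Nat) : Int) + 1 from by push_cast; ring]
              · rintro (h | h)
                · exact absurd hlast.1 (by omega)
                · exact h hlast.2
            · rw [if_pos ?_, if_neg hlast, if_neg (by simp)]
              rcases not_and_or.mp hlast with h | h
              · left; omega
              · right; exact h
          · -- recursion fails; B fails at pos too
            have hfalse : pvOnes expr (pos + ((w + 1 + 1 : Nat) : Int)) (w + 1) = false :=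
              Bool.not_eq_true _ |>.mp hok
            rw [pvFinish, if_neg (Nat.succ_ne_zero w), e1, hfalse, if_neg (by simp),
                pvAfter_false, pvFinish, if_neg (Nat.succ_ne_zero (w + 1)), hpeel, hfalse,
                Bool.false_and, if_neg (by simp)]
    · -- current char not '0' (or pos ≥ len): both return (false, pos)
      have c1 : ¬ (pos + 1 < PySem.Str.len expr ∧ PySem.Str.pyGet? expr pos = some '0'
          ∧ PySem.Str.pyGet? expr (pos + 1) = some '1') := by
        intro ⟨h1, h2, _⟩; exact c2 ⟨by omega, h2⟩
      rw [parse_c, if_neg c1, dif_neg c2, parse_c_alt, pvZeros_eq_zero expr pos c2,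
          pvFinish, if_pos rfl]

-- ===== VERDICT (by name: the statement is the Claim_ definition above) =====
theorem parse_c_spec : Claim_equal_parse_c := by
  intro expr pos _ _
  unfold Spec_parse_c
  exact parse_c_agree expr (PySem.Str.len expr - pos).toNat pos le_rfl
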